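-- pv_equiv track=rewrite | github.com/milancvetanovic/SmartCalculator | parsing_math_expression.py | plus_minus_signs
-- ===== SOURCE A (Python) =====
-- def plus_minus_signs(expression):
--     i = 0
--     while i < len(expression) - 1:
--         if expression[i] == '+':
--             if expression[i + 1] == '+':
--                 expression.pop(i + 1)
--                 continue
--             if expression[i + 1] == '-':
--                 expression.pop(i)
--                 continue
--         if expression[i] == '-':
--             if expression[i + 1] == '+':
--                 expression.pop(i + 1)
--                 continue
--             if expression[i + 1] == '-':
--                 expression[i] = '+'
--                 expression.pop(i + 1)
--                 continue
--         i += 1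
--
--     return expression
-- ===== SOURCE B (Python) =====
-- def plus_minus_signs(expression):
--     # Single pass: collapse each maximal run of '+'/'-' tokens into one sign
--     # by parity of the minuses. Returns a NEW list (A mutates in place;
--     # the equivalence is about the return value).
--     out = []
--     in_run = False
--     minus = False
--     for tok in expression:
--         if tok == '+' or tok == '-':
--             in_run = True
--             if tok == '-':
--                 minus = not minus
--         else:
--             if in_run:
--                 out.append('-' if minus else '+')
--                 in_run = False
--                 minus = False
--             out.append(tok)
--     if in_run:
--         out.append('-' if minus else '+')
--     return out
-- ===== Notes on version B (the rewrite author's own statement) =====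
-- stated objective: faster
-- what changed: Replaces A's quadratic in-place while loop (each '+/-' merge is an O(n) list.pop and re-checks the same index) with a single left-to-right pass that groups each maximal run of sign tokens and emits one sign by the parity of its minuses; B returns a new list while A mutates its argument in place.
import Mathlib
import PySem

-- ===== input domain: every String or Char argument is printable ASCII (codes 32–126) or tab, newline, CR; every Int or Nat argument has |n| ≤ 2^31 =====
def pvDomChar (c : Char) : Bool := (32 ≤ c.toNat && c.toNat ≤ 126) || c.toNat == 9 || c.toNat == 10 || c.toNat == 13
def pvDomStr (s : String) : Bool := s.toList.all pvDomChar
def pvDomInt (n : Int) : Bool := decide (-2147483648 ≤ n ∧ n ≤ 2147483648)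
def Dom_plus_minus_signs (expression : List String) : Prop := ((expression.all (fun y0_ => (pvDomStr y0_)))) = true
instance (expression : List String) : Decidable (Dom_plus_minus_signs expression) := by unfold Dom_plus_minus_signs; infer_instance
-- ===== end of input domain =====

-- B collapses each maximal run of '+'/'-' tokens in one O(n) pass by minus-parity,
-- instead of A's in-place quadratic pop loop; A mutates its argument, B builds a new
-- list — the equivalence proved here is about the RETURN value.

-- ===== PORT A =====
-- A's while loop with in-place pops, as well-founded recursion on (i, the list):
-- each iteration either removes one element (i unchanged) or advances i.
def pmsLoopA (e : List String) (i : Nat) : List String :=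
  if h : i < e.length - 1 then
    if e.getD i "" = "+" then
      if e.getD (i+1) "" = "+" then pmsLoopA (e.eraseIdx (i+1)) i
      else if e.getD (i+1) "" = "-" then pmsLoopA (e.eraseIdx i) i
      else pmsLoopA e (i+1)
    else if e.getD i "" = "-" then
      if e.getD (i+1) "" = "+" then pmsLoopA (e.eraseIdx (i+1)) i
      else if e.getD (i+1) "" = "-" then pmsLoopA ((e.set i "+").eraseIdx (i+1)) i
      else pmsLoopA e (i+1)
    else pmsLoopA e (i+1)
  else e
termination_by e.length - i
decreasing_by
  all_goals first
  | omega
  | (simp only [List.length_eraseIdx, List.length_set]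
     split <;> omega)

def plus_minus_signs (expression : List String) : List String :=
  pmsLoopA expression 0

-- ===== PORT B =====
-- B's for loop: state = (in_run, minus parity); recursion over the token list.
def pmsLoopB (e : List String) (inRun : Bool) (minus : Bool) : List String :=
  match e with
  | [] => if inRun then [if minus then "-" else "+"] else []
  | t :: ts =>
    if t = "+" ∨ t = "-" then
      pmsLoopB ts true (if t = "-" then !minus else minus)
    else
      (if inRun then [if minus then "-" else "+"] else []) ++ t :: pmsLoopB ts false false

def plus_minus_signs_alt (expression : List String) : List String :=
  pmsLoopB expression false false

-- ===== PRECONDITION & SPEC =====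
def Spec_plus_minus_signs (expression : List String) (out : List String) : Prop := out = plus_minus_signs_alt expression
instance (expression : List String) (out : List String) : Decidable (Spec_plus_minus_signs expression out) := by unfold Spec_plus_minus_signs; infer_instance

-- ===== CLAIM (what is proved, stated in full; the proofs are below) =====
def Claim_equal_plus_minus_signs : Prop := ∀ (expression : List String), Dom_plus_minus_signs expression → Spec_plus_minus_signs expression (plus_minus_signs expression)

-- ===== LEMMAS AND PROOFS =====

-- canonical one-step-combining recursion both ports are equal to
def pmsG : List String → List String
  | [] => []
  | [x] => [x]
  | x :: y :: rest =>
    if (x = "+" ∨ x = "-") ∧ (y = "+" ∨ y = "-") then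
      pmsG ((if x = y then "+" else "-") :: rest)
    else x :: pmsG (y :: rest)
termination_by l => l.length

lemma pmsG_nil : pmsG [] = [] := by rw [pmsG]

lemma pmsG_one (x : String) : pmsG [x] = [x] := by rw [pmsG]

lemma pmsG_two (x y : String) (rest : List String) :
    pmsG (x :: y :: rest) =
      if (x = "+" ∨ x = "-") ∧ (y = "+" ∨ y = "-") then
        pmsG ((if x = y then "+" else "-") :: rest)
      else x :: pmsG (y :: rest) := by
  rw [pmsG]

lemma pmsG_cons_nosign (t : String) (ts : List String)
    (ht : ¬ (t = "+" ∨ t = "-")) : pmsG (t :: ts) = t :: pmsG ts := by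
  match ts with
  | [] => rw [pmsG_one, pmsG_nil]
  | y :: rest => rw [pmsG_two, if_neg (fun h => ht h.1)]

lemma pmsLoopA_shift (e : List String) (i : Nat) (a : String) :
    pmsLoopA (a :: e) (i + 1) = a :: pmsLoopA e i := by
  fun_induction pmsLoopA e i with
  | case1 e i h h1 h2 ih =>
    rw [pmsLoopA]
    simp only [List.length_cons, List.getD_cons_succ, List.eraseIdx_cons_succ]
    rw [dif_pos (by omega), if_pos h1, if_pos h2, ih]
  | case2 e i h h1 h2 h3 ih =>
    rw [pmsLoopA]
    simp only [List.length_cons, List.getD_cons_succ, List.eraseIdx_cons_succ]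
    rw [dif_pos (by omega), if_pos h1, if_neg h2, if_pos h3, ih]
  | case3 e i h h1 h2 h3 ih =>
    rw [pmsLoopA]
    simp only [List.length_cons, List.getD_cons_succ]
    rw [dif_pos (by omega), if_pos h1, if_neg h2, if_neg h3, ih]
  | case4 e i h h1 h2 h3 ih =>
    rw [pmsLoopA]
    simp only [List.length_cons, List.getD_cons_succ, List.eraseIdx_cons_succ]
    rw [dif_pos (by omega), if_neg h1, if_pos h2, if_pos h3, ih]
  | case5 e i h h1 h2 h3 h4 ih =>
    rw [pmsLoopA]
    simp only [List.length_cons, List.getD_cons_succ, List.eraseIdx_cons_succ,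
      List.set_cons_succ]
    rw [dif_pos (by omega), if_neg h1, if_pos h2, if_neg h3, if_pos h4, ih]
  | case6 e i h h1 h2 h3 h4 ih =>
    rw [pmsLoopA]
    simp only [List.length_cons, List.getD_cons_succ]
    rw [dif_pos (by omega), if_neg h1, if_pos h2, if_neg h3, if_neg h4, ih]
  | case7 e i h h1 h2 ih =>
    rw [pmsLoopA]
    simp only [List.length_cons, List.getD_cons_succ]
    rw [dif_pos (by omega), if_neg h1, if_neg h2, ih]
  | case8 e i h =>
    rw [pmsLoopA]
    rw [dif_neg (by simp only [List.length_cons]; omega)]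

lemma pmsLoopA_zero_eq_g (e : List String) : pmsLoopA e 0 = pmsG e := by
  fun_induction pmsG e with
  | case1 => rw [pmsLoopA]; rw [dif_neg (by simp)]
  | case2 x => rw [pmsLoopA]; rw [dif_neg (by simp)]
  | case3 x y rest hsig ih =>
    obtain ⟨hx, hy⟩ := hsig
    rw [pmsLoopA]
    rw [dif_pos (by simp only [List.length_cons]; omega)]
    simp only [List.getD_cons_zero, List.getD_cons_succ, Nat.zero_add,
      List.eraseIdx_cons_succ, List.eraseIdx_cons_zero, List.set_cons_zero]
    rcases hx with hx | hx <;> rcases hy with hy | hy <;> subst hx <;> subst hy <;>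
      simpa using ih
  | case4 x y rest hsig ih =>
    rw [pmsLoopA]
    rw [dif_pos (by simp only [List.length_cons]; omega)]
    simp only [List.getD_cons_zero, List.getD_cons_succ, Nat.zero_add]
    by_cases hx1 : x = "+"
    · have hy1 : ¬ y = "+" := fun h => hsig ⟨Or.inl hx1, Or.inl h⟩
      have hy2 : ¬ y = "-" := fun h => hsig ⟨Or.inl hx1, Or.inr h⟩
      rw [if_pos hx1, if_neg hy1, if_neg hy2, pmsLoopA_shift, ih, hx1]
    · by_cases hx2 : x = "-"
      · have hy1 : ¬ y = "+" := fun h => hsig ⟨Or.inr hx2, Or.inl h⟩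
        have hy2 : ¬ y = "-" := fun h => hsig ⟨Or.inr hx2, Or.inr h⟩
        rw [if_neg hx1, if_pos hx2, if_neg hy1, if_neg hy2, pmsLoopA_shift, ih, hx2]
      · rw [if_neg hx1, if_neg hx2, pmsLoopA_shift, ih]

lemma pmsLoopB_eq_g (ts : List String) :
    (∀ m : Bool, pmsLoopB ts true m = pmsG ((if m then "-" else "+") :: ts)) ∧
      pmsLoopB ts false false = pmsG ts := by
  induction ts with
  | nil =>
    constructor
    · intro m; rw [pmsLoopB, pmsG_one]; simp
    · rw [pmsLoopB, pmsG_nil]; simp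
  | cons t ts ih =>
    obtain ⟨ih1, ih2⟩ := ih
    constructor
    · intro m
      have hsgn : ((if m then "-" else "+" : String) = "+" ∨
          ((if m then "-" else "+" : String) = "-")) := by cases m <;> simp
      rw [pmsLoopB, pmsG_two]
      by_cases ht : t = "+" ∨ t = "-"
      · have hcond : (((if m = true then "-" else "+") : String) = "+" ∨
            ((if m = true then "-" else "+") : String) = "-") ∧ (t = "+" ∨ t = "-") :=
          ⟨hsgn, ht⟩
        rw [if_pos ht, if_pos hcond, ih1]
        rcases ht with h | h <;> subst h <;> cases m <;> simp
      · have hcond : ¬ ((((if m = true then "-" else "+") : String) = "+" ∨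
            ((if m = true then "-" else "+") : String) = "-") ∧ (t = "+" ∨ t = "-")) :=
          fun h => ht h.2
        rw [if_neg ht, if_neg hcond, ih2, pmsG_cons_nosign t ts ht]
        simp
    · rw [pmsLoopB]
      by_cases ht : t = "+" ∨ t = "-"
      · rw [if_pos ht, ih1]
        rcases ht with h | h <;> subst h <;> simp
      · rw [if_neg ht, ih2, pmsG_cons_nosign t ts ht]
        simp

-- ===== VERDICT (by name: the statement is the Claim_ definition above) =====
theorem plus_minus_signs_spec : Claim_equal_plus_minus_signs := by
  intro e _
  show plus_minus_signs e = plus_minus_signs_alt e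
  rw [plus_minus_signs, plus_minus_signs_alt, pmsLoopA_zero_eq_g,
    (pmsLoopB_eq_g e).2]
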